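-- pv_equiv track=rewrite | github.com/sanger-pathogens/iva | iva/mapping.py | _remove_indels
-- ===== SOURCE A (Python) =====
-- def _remove_indels(l, p_or_m):
--     while True:
--         try:
--             i = l.index(p_or_m)
--         except:
--             break
--
--         start_i = i
--         i += 1
--         assert l[i].isdigit()
--         while l[i].isdigit():
--             i += 1
--
--         indel_length = int(''.join(l[start_i+1:i]))
--         l = l[:start_i] + l[i + indel_length:]
--
--     return l
-- ===== SOURCE B (Python) =====
-- def _remove_indels(l, p_or_m):
--     # Single left-to-right pass: parse each marker's digit run, skip the
--     # indel characters, and build the output once.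
--     out = []
--     i = 0
--     n = len(l)
--     while i < n:
--         if l[i] == p_or_m:
--             j = i + 1
--             digits = []
--             while j < n and l[j].isdigit():
--                 digits.append(l[j])
--                 j += 1
--             assert digits
--             i = j + int(''.join(digits))
--         else:
--             out.append(l[i])
--             i += 1
--     return out
-- ===== Notes on version B (the rewrite author's own statement) =====
-- stated objective: alternative
-- what changed: A repeatedly rescans the list from the start with l.index and rebuilds it by slicing/concatenation after every indel; B makes one left-to-right pass that parses each marker's digit run, skips the indel characters, and appends the kept elements to a single output list.
-- outside the precondition, e.g. on _remove_indels(['+', '2', '+', 'a', 'x', 'y'], '+'): A returns ['x', 'y'], B returns ['x', 'y']; on _remove_indels(['+', '1', '+', '9'], '+'): A returns ['9'], B returns ['9']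
import Mathlib
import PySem

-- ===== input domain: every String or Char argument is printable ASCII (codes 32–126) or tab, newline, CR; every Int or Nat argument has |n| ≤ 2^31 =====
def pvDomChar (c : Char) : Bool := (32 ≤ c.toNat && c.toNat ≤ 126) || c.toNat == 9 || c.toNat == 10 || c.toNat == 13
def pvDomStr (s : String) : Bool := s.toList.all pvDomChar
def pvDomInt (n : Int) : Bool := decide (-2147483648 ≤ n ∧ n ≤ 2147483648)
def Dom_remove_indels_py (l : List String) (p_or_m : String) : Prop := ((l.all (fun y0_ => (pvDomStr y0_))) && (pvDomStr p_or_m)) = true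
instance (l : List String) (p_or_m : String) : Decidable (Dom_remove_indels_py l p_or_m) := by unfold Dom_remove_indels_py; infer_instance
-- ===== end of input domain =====

-- B replaces A's rescan-and-rebuild loop (l.index + list slicing each round)
-- with a single left-to-right pass building the output once (objective: alternative).
-- Fuel arguments below only totalize the loops (each loop provably makes
-- progress, so the fuel never runs out); they are not part of either algorithm.

-- ===== PORT A =====

-- A's inner `while l[i].isdigit(): i += 1`; when i runs past the end Python
-- raises IndexError, this total form stops there (such inputs are excluded by Pre_).
def pvRunEndA (l : List String) : Nat → Nat → Nat
  | 0, i => i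
  | fuel + 1, i =>
    if h : i < l.length then
      if PySem.Str.strIsdigit l[i] then pvRunEndA l fuel (i + 1) else i
    else i

-- A's `while True` loop: find the first marker, walk the digit run, join/int the
-- digits and rebuild the list from the two slices.  Python's locals `i` and
-- `indel_length` are inlined.  Where Python raises (assert failure / IndexError)
-- the port returns the current list; those inputs are excluded by Pre_.
def pvLoopA (p_or_m : String) : Nat → List String → List String
  | 0, l => l
  | fuel + 1, l =>
    match PySem.List.index? l p_or_m with
    | none => l
    | some start_i =>
      if PySem.Str.strIsdigit ((PySem.List.pyGet? l ((start_i + 1 : Nat) : Int)).getD "") = true then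
        pvLoopA p_or_m fuel
          (PySem.List.slice l none (some ((start_i : Nat) : Int)) ++
           PySem.List.slice l
             (some ((pvRunEndA l l.length (start_i + 1) +
               ((PySem.Int.ofStr? (PySem.Str.join "" (PySem.List.slice l
                 (some ((start_i + 1 : Nat) : Int))
                 (some ((pvRunEndA l l.length (start_i + 1) : Nat) : Int))))).getD 0).toNat : Nat) : Int)) none)
      else l

def remove_indels_py (l : List String) (p_or_m : String) : List String :=
  pvLoopA p_or_m (l.length + 1) l

-- ===== PORT B =====

-- B's inner `while j < n and l[j].isdigit()` collecting the digit strings.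
def pvParseRunB (l : List String) : Nat → Nat → List String → Nat × List String
  | 0, j, digits => (j, digits)
  | fuel + 1, j, digits =>
    if h : j < l.length then
      if PySem.Str.strIsdigit l[j] then pvParseRunB l fuel (j + 1) (digits ++ [l[j]]) else (j, digits)
    else (j, digits)

-- B's single pass: copy non-marker elements, and at a marker parse the digit run
-- and jump over the indel characters.  Where Python's `assert digits` fails the
-- port returns `out`; those inputs are excluded by Pre_.
def pvScanB (l : List String) (p_or_m : String) : Nat → Nat → List String → List String
  | 0, _, out => out
  | fuel + 1, i, out =>
    if h : i < l.length then
      if l[i] == p_or_m then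
        let r := pvParseRunB l l.length (i + 1) []
        if r.2 = [] then out
        else pvScanB l p_or_m fuel (r.1 + ((PySem.Int.ofStr? (PySem.Str.join "" r.2)).getD 0).toNat) out
      else pvScanB l p_or_m fuel (i + 1) (out ++ [l[i]])
    else out

def remove_indels_py_alt (l : List String) (p_or_m : String) : List String :=
  pvScanB l p_or_m (l.length + 1) 0 []

-- ===== PRECONDITION & SPEC =====
-- Pre_: every occurrence of the marker is immediately followed by a digit string
-- and its digit run ends strictly before the end of the list (otherwise Python A
-- raises AssertionError/IndexError).  This closed form also excludes a few inputs
-- on which A still returns: occurrences violating it that lie inside a region an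
-- earlier indel skips (see claim cites) — there A and B agree anyway.
def Pre_remove_indels_py (l : List String) (p_or_m : String) : Prop :=
  ∀ j < l.length, l.getD j "" = p_or_m →
    (j + 1 < l.length ∧ PySem.Str.strIsdigit (l.getD (j + 1) "") = true ∧
      ∃ k < l.length, j + 1 < k ∧ PySem.Str.strIsdigit (l.getD k "") = false)
instance (l : List String) (p_or_m : String) : Decidable (Pre_remove_indels_py l p_or_m) := by
  unfold Pre_remove_indels_py; infer_instance

def pvWitness_remove_indels_py : List String × String := (["A", "+", "2", "x", "C", "G"], "+")

def Spec_remove_indels_py (l : List String) (p_or_m : String) (out : List String) : Prop := out = remove_indels_py_alt l p_or_m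
instance (l : List String) (p_or_m : String) (out : List String) : Decidable (Spec_remove_indels_py l p_or_m out) := by unfold Spec_remove_indels_py; infer_instance

-- ===== CLAIM (what is proved, stated in full; the proofs are below) =====
def Claim_equal_remove_indels_py : Prop := ∀ (l : List String) (p_or_m : String), Dom_remove_indels_py l p_or_m → Pre_remove_indels_py l p_or_m → Spec_remove_indels_py l p_or_m (remove_indels_py l p_or_m)

-- ===== LEMMAS AND PROOFS =====

-- reference function both ports are reduced to: structural one-pass removal.
def pvSpec (p : String) : List String → List String
  | [] => []
  | x :: rest =>
    if x == p then
      if rest.takeWhile (fun s => PySem.Str.strIsdigit s) = [] then []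
      else
        pvSpec p ((rest.dropWhile (fun s => PySem.Str.strIsdigit s)).drop
          ((PySem.Int.ofStr? (PySem.Str.join "" (rest.takeWhile (fun s => PySem.Str.strIsdigit s)))).getD 0).toNat)
    else x :: pvSpec p rest
termination_by l => l.length
decreasing_by
  · have := List.length_dropWhile_le (fun s => PySem.Str.strIsdigit s) rest
    simp only [List.length_drop, List.length_cons]
    omega
  · simp

theorem pv_dropWhile_eq_drop {α : Type} (q : α → Bool) (l : List α) :
    l.dropWhile q = l.drop (l.takeWhile q).length := by
  induction l with
  | nil => simp
  | cons x xs ih =>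
    by_cases h : q x
    · simp [h, ih]
    · simp [h]

theorem pvRunEndA_eq (l : List String) (fuel i : Nat) (hfuel : l.length ≤ i + fuel) :
    pvRunEndA l fuel i = i + ((l.drop i).takeWhile (fun s => PySem.Str.strIsdigit s)).length := by
  induction fuel generalizing i with
  | zero =>
    rw [pvRunEndA, List.drop_eq_nil_of_le (by omega)]
    simp
  | succ fuel ih =>
    rw [pvRunEndA]
    split
    · rename_i h
      rw [List.drop_eq_getElem_cons h, List.takeWhile_cons]
      split
      · rw [ih (i + 1) (by omega)]; simp; omega
      · simp
    · rename_i h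
      rw [List.drop_eq_nil_of_le (by omega)]
      simp

theorem pvParseRunB_eq (l : List String) (fuel j : Nat) (digits : List String)
    (hfuel : l.length ≤ j + fuel) :
    pvParseRunB l fuel j digits =
      (j + ((l.drop j).takeWhile (fun s => PySem.Str.strIsdigit s)).length,
       digits ++ (l.drop j).takeWhile (fun s => PySem.Str.strIsdigit s)) := by
  induction fuel generalizing j digits with
  | zero =>
    rw [pvParseRunB, List.drop_eq_nil_of_le (by omega)]
    simp
  | succ fuel ih =>
    rw [pvParseRunB]
    split
    · rename_i h
      rw [List.drop_eq_getElem_cons h, List.takeWhile_cons]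
      split
      · rw [ih (j + 1) _ (by omega)]
        simp
        omega
      · simp
    · rename_i h
      rw [List.drop_eq_nil_of_le (by omega)]
      simp

theorem pvScanB_eq (l : List String) (p : String) (fuel i : Nat) (out : List String)
    (hfuel : l.length - i < fuel) :
    pvScanB l p fuel i out = out ++ pvSpec p (l.drop i) := by
  induction fuel generalizing i out with
  | zero => omega
  | succ fuel ih =>
    rw [pvScanB]
    split
    · rename_i h
      rw [List.drop_eq_getElem_cons h]
      by_cases hp : l[i] == p
      · rw [if_pos hp]
        unfold pvSpec
        rw [if_pos hp]
        rw [pvParseRunB_eq l l.length (i + 1) [] (by omega)]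
        simp only [List.nil_append]
        by_cases hnil : ((l.drop (i + 1)).takeWhile (fun s => PySem.Str.strIsdigit s)) = []
        · rw [hnil]; simp
        · rw [if_neg hnil, if_neg hnil]
          rw [ih _ _ (by omega)]
          rw [pv_dropWhile_eq_drop, List.drop_drop, List.drop_drop]
          ring_nf
      · rw [if_neg hp]
        unfold pvSpec
        rw [if_neg hp]
        rw [ih _ _ (by omega)]
        simp
    · rename_i h
      rw [List.drop_eq_nil_of_le (by omega)]
      simp [pvSpec]

theorem pvSpec_append_free (p : String) (a b : List String)
    (ha : ∀ x ∈ a, x ≠ p) : pvSpec p (a ++ b) = a ++ pvSpec p b := by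
  induction a with
  | nil => simp
  | cons x xs ih =>
    have hx : (x == p) = false := beq_eq_false_iff_ne.mpr (ha x (by simp))
    simp only [List.cons_append]
    rw [pvSpec, if_neg (by simp [hx] : ¬ (x == p) = true)]
    rw [ih (fun y hy => ha y (by simp [hy]))]

theorem pvSpec_not_mem (p : String) (l : List String) (h : p ∉ l) : pvSpec p l = l := by
  have h0 := pvSpec_append_free p l [] (fun x hx => by rintro rfl; exact h hx)
  rw [List.append_nil] at h0
  rw [h0, pvSpec, List.append_nil]

-- Pre_ is preserved by removing a marker-free prefix together with any region after it.
theorem pv_pre_pres (l : List String) (p : String) (st m : Nat)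
    (hPre : Pre_remove_indels_py l p) (hst : st ≤ l.length)
    (hfree : ∀ j < st, l.getD j "" ≠ p) :
    Pre_remove_indels_py (l.take st ++ l.drop m) p := by
  intro j hj hjp
  have hlen : (l.take st ++ l.drop m).length = st + (l.length - m) := by
    rw [List.length_append, List.length_take, List.length_drop]; omega
  have hget : ∀ i < st + (l.length - m),
      (l.take st ++ l.drop m).getD i "" = if i < st then l.getD i "" else l.getD (m + (i - st)) "" := by
    intro i hi
    by_cases hcase : i < st
    · rw [if_pos hcase]
      rw [List.getD_eq_getElem?_getD, List.getD_eq_getElem?_getD]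
      rw [List.getElem?_append_left (by simp [List.length_take]; omega)]
      rw [List.getElem?_take]
      simp [hcase]
    · rw [if_neg hcase]
      rw [List.getD_eq_getElem?_getD, List.getD_eq_getElem?_getD]
      rw [List.getElem?_append_right (by simp [List.length_take]; omega)]
      simp only [List.length_take]
      rw [List.getElem?_drop, Nat.min_eq_left hst]
  rw [hlen] at hj
  rw [hget j hj] at hjp
  by_cases hcase : j < st
  · rw [if_pos hcase] at hjp
    exact absurd hjp (hfree j hcase)
  · rw [if_neg hcase] at hjp
    have hk := hPre (m + (j - st)) (by omega) hjp
    obtain ⟨h1, h2, k, hk1, hk2, hk3⟩ := hk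
    refine ⟨by omega, ?_, ?_⟩
    · rw [hget (j + 1) (by omega), if_neg (by omega)]
      have : m + (j + 1 - st) = m + (j - st) + 1 := by omega
      rw [this]; exact h2
    · refine ⟨st + (k - m), by omega, by omega, ?_⟩
      rw [hget (st + (k - m)) (by omega), if_neg (by omega)]
      have : m + (st + (k - m) - st) = k := by omega
      rw [this]; exact hk3

theorem pv_main_aux (fuel : Nat) : ∀ (l : List String) (p : String), l.length < fuel →
    Pre_remove_indels_py l p → pvLoopA p fuel l = pvSpec p l := by
  induction fuel with
  | zero => intro l p hlen _; omega
  | succ fuel ih =>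
    intro l p hlen hPre
    rw [pvLoopA]
    split
    · rename_i hidx
      have hnm : p ∉ l := (PySem.List.index?_eq_none_iff l p).mp hidx
      rw [pvSpec_not_mem p l hnm]
    · rename_i st hidx
      obtain ⟨pre, suf, hl, hplen, hnmem⟩ := (PySem.List.index?_eq_some_iff l p st).mp hidx
      obtain ⟨hstlen, -, hfirst⟩ := PySem.List.getElem_of_index?_eq_some hidx
      have hgetst : l.getD st "" = p := by
        rw [hl, List.getD_eq_getElem?_getD, List.getElem?_append_right (by omega)]
        simp [hplen]
      obtain ⟨h1, h2, k, hklen, hk2, hk3⟩ := hPre st hstlen hgetst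
      have hget1 : (PySem.List.pyGet? l ((st + 1 : Nat) : Int)).getD "" = l.getD (st + 1) "" := by
        rw [PySem.List.pyGet?_natCast, List.getD_eq_getElem?_getD]
      rw [if_pos (by rw [hget1]; exact h2)]
      have hieq : pvRunEndA l l.length (st + 1) =
          st + 1 + ((l.drop (st + 1)).takeWhile (fun s => PySem.Str.strIsdigit s)).length :=
        pvRunEndA_eq l l.length (st + 1) (by omega)
      set d := (l.drop (st + 1)).takeWhile (fun s => PySem.Str.strIsdigit s) with hd
      have hslice_digits :
          PySem.List.slice l (some ((st + 1 : Nat) : Int)) (some ((pvRunEndA l l.length (st + 1) : Nat) : Int)) = d := by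
        rw [PySem.List.slice_natCast, hieq]
        have harith : st + 1 + d.length - (st + 1) = d.length := by omega
        rw [harith]
        exact (List.prefix_iff_eq_take.mp (List.takeWhile_prefix _)).symm
      have hd1 : l.getD (st + 1) "" = l[st + 1] := by
        rw [List.getD_eq_getElem?_getD, List.getElem?_eq_getElem h1]; rfl
      have hdcons : d = l[st + 1] :: (l.drop (st + 2)).takeWhile (fun s => PySem.Str.strIsdigit s) := by
        rw [hd, List.drop_eq_getElem_cons h1, List.takeWhile_cons, if_pos (by rw [← hd1]; exact h2)]
      have hdne : d ≠ [] := by rw [hdcons]; simp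
      have hi2 : st + 2 ≤ pvRunEndA l l.length (st + 1) := by
        rw [hieq, hdcons]; simp only [List.length_cons]; omega
      have hi3 : pvRunEndA l l.length (st + 1) ≤ l.length := by
        have hdlen : d.length ≤ (l.drop (st + 1)).length := by
          rw [hd]; exact (List.takeWhile_prefix _).length_le
        rw [List.length_drop] at hdlen
        omega
      have hpre_take : l.take st = pre := by
        rw [hl, ← hplen, List.take_left]
      have hfree : ∀ j < st, l.getD j "" ≠ p := by
        intro j hj
        have hjl : j < l.length := by omega
        rw [List.getD_eq_getElem?_getD, List.getElem?_eq_getElem hjl]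
        exact hfirst j hj
      rw [hslice_digits, PySem.List.slice_to_natCast, PySem.List.slice_from_natCast]
      set i := pvRunEndA l l.length (st + 1) with hi
      set n := ((PySem.Int.ofStr? (PySem.Str.join "" d)).getD 0).toNat with hn
      clear_value i
      have hPre' : Pre_remove_indels_py (l.take st ++ l.drop (i + n)) p :=
        pv_pre_pres l p st (i + n) hPre (by omega) hfree
      have hlen' : (l.take st ++ l.drop (i + n)).length < fuel := by
        simp only [List.length_append, List.length_take, List.length_drop]
        omega
      rw [ih _ p hlen' hPre']
      have hsuf : l.drop (st + 1) = suf := by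
        rw [hl, ← hplen, ← List.drop_drop, List.drop_left]
        simp
      have hfreepre : ∀ x ∈ pre, x ≠ p := fun x hx heq => hnmem (heq ▸ hx)
      have harg : ((l.drop (st + 1)).dropWhile (fun s => PySem.Str.strIsdigit s)).drop n =
          l.drop (i + n) := by
        rw [pv_dropWhile_eq_drop, ← hd, List.drop_drop, List.drop_drop]
        simp only [← Nat.add_assoc]
        rw [← hieq]
      have hcons : pvSpec p (p :: suf) = pvSpec p (l.drop (i + n)) := by
        rw [pvSpec, if_pos (by simp), ← hsuf, ← hd, if_neg hdne, ← hn, harg]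
      have hR : pvSpec p l = pre ++ pvSpec p (l.drop (i + n)) := by
        conv_lhs => rw [hl]
        rw [pvSpec_append_free p pre _ hfreepre, hcons]
      have hL : pvSpec p (l.take st ++ l.drop (i + n)) = pre ++ pvSpec p (l.drop (i + n)) := by
        rw [hpre_take]
        exact pvSpec_append_free p pre _ hfreepre
      rw [hL, hR]

-- ===== VERDICT (by name: the statement is the Claim_ definition above) =====
theorem remove_indels_py_spec : Claim_equal_remove_indels_py := by
  intro l p _ hPre
  unfold Spec_remove_indels_py remove_indels_py_alt remove_indels_py
  rw [pvScanB_eq l p (l.length + 1) 0 [] (by omega)]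
  simp only [List.drop_zero, List.nil_append]
  exact pv_main_aux (l.length + 1) l p (by omega) hPre
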